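-- pv_equiv track=rewrite | github.com/hsaless/Seguranca-Computacional | Listas De Exercicios/Lista De Exercicios 1/transposition_cipher_decodnk.py | transposition_cipher_decod
-- ===== SOURCE A (Python) =====
-- from itertools import permutations
--
-- def transposition_cipher_decod(cipher_text):
--     max_key_length = 26
--     possible_plaintexts = []
--
--
--     for key_length in range(1, max_key_length + 1):
--         if len(cipher_text) % key_length != 0:
--             continue
--
--         num_rows = len(cipher_text) // key_length
--         matriz = [[None] * key_length for _ in range(num_rows)]
--
--
--         for perm in permutations(range(key_length)):
--             dic = {}
--             for i in range(key_length):
--                 dic[perm[i]] = i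
--
--             ind = 0
--
--             for coluna in range(key_length):
--                 for linha in range(num_rows):
--                     matriz[linha][dic[coluna]] = cipher_text[ind]
--                     ind += 1
--
--
--             plain_text = ""
--             for row in matriz:
--                 for letter in row:
--                     plain_text += letter
--
--             possible_plaintexts.append((plain_text, perm))
--
--     return possible_plaintexts
-- ===== SOURCE B (Python) =====
-- from itertools import permutations
--
-- def transposition_cipher_decod(cipher_text):
--     n = len(cipher_text)
--     results = []
--     for key_length in range(1, 27):
--         if n % key_length != 0:
--             continue
--         num_rows = n // key_length
--         chunks = [cipher_text[c * num_rows:(c + 1) * num_rows] for c in range(key_length)]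
--         for perm in permutations(range(key_length)):
--             plain_text = "".join(chunks[perm[j]][row]
--                                  for row in range(num_rows)
--                                  for j in range(key_length))
--             results.append((plain_text, perm))
--     return results
-- ===== Notes on version B (the rewrite author's own statement) =====
-- stated objective: alternative
-- what changed: B replaces A's per-permutation inverse-permutation dict, mutable matrix fill and row-by-row string concatenation by slicing the ciphertext once per key length into contiguous chunks and joining chunk[perm[j]][row] directly in row-major order.
import Mathlib
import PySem

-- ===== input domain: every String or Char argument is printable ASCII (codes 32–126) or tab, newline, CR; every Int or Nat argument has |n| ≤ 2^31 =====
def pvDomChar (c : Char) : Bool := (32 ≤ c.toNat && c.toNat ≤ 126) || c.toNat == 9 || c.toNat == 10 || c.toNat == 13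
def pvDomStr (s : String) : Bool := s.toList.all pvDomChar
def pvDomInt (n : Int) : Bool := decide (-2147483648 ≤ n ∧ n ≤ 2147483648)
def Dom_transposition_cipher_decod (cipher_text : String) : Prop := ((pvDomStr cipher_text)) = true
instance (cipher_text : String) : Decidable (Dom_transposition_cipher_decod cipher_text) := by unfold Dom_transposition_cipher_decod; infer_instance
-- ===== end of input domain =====

-- B replaces A's inverse-permutation dict + mutable matrix + row-concatenation by contiguous
-- ciphertext chunks read directly in row-major order ('alternative' objective; same asymptotics).

-- shared helper: itertools.permutations(xs) in Python's emission order (both Pythons call it)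
def pyPermsAux : Nat → List Int → List (List Int)
  | 0, _ => [[]]
  | n+1, xs =>
      (List.range xs.length).flatMap (fun i =>
        (pyPermsAux n (xs.eraseIdx i)).map (fun p => xs.getD i 0 :: p))

def pyPerms (xs : List Int) : List (List Int) := pyPermsAux xs.length xs

-- ===== PORT A =====
-- helper for "plain_text += letter" (letter is never None on reached inputs: every cell is overwritten)
def pvStep (s : String) (letter : Option Char) : String :=
  match letter with
  | some c => s.push c
  | none => s

def transposition_cipher_decod (cipher_text : String) : List (String × List Int) :=
  let cs := cipher_text.toList
  let max_key_length : Int := 26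
  (PySem.List.pyRange 1 (max_key_length + 1) 1).foldl (fun possible_plaintexts key_length =>
    if PySem.Int.mod (cs.length : Int) key_length ≠ 0 then possible_plaintexts
    else
      let num_rows : Int := PySem.Int.floordiv (cs.length : Int) key_length
      let matriz0 : List (List (Option Char)) :=
        (PySem.List.pyRange 0 num_rows 1).map (fun _ =>
          (PySem.List.pyRange 0 key_length 1).map (fun _ => (none : Option Char)))
      -- the matrix is created once per key_length and rewritten by every perm: thread it through the fold
      let res := (pyPerms (PySem.List.pyRange 0 key_length 1)).foldl
        (fun (st : List (List (Option Char)) × List (String × List Int)) perm =>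
          let dic : PySem.Dict Int Int :=
            (PySem.List.pyRange 0 key_length 1).foldl
              (fun d i => d.insert (PySem.List.pyGetD perm i 0) i) PySem.Dict.empty
          let fill := (PySem.List.pyRange 0 key_length 1).foldl
            (fun (t : List (List (Option Char)) × Int) coluna =>
              (PySem.List.pyRange 0 num_rows 1).foldl
                (fun (t : List (List (Option Char)) × Int) linha =>
                  (PySem.List.pySetD t.1 linha
                     (PySem.List.pySetD (PySem.List.pyGetD t.1 linha [])
                        (PySem.Dict.getD dic coluna 0)
                        (some (PySem.List.pyGetD cs t.2 ' '))),
                   t.2 + 1)) t)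
            (st.1, (0 : Int))
          let plain_text := fill.1.foldl (fun s row => row.foldl pvStep s) ""
          (fill.1, st.2 ++ [(plain_text, perm)]))
        (matriz0, possible_plaintexts)
      res.2) []

-- ===== PORT B =====
def transposition_cipher_decod_alt (cipher_text : String) : List (String × List Int) :=
  let cs := cipher_text.toList
  let n : Int := cs.length
  (PySem.List.pyRange 1 27 1).foldl (fun results key_length =>
    if PySem.Int.mod n key_length ≠ 0 then results
    else
      let num_rows := PySem.Int.floordiv n key_length
      let chunks := (PySem.List.pyRange 0 key_length 1).map (fun c =>
        PySem.List.slice cs (some (c * num_rows)) (some ((c + 1) * num_rows)))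
      results ++ (pyPerms (PySem.List.pyRange 0 key_length 1)).map (fun perm =>
        (String.ofList ((PySem.List.pyRange 0 num_rows 1).flatMap (fun row =>
            (PySem.List.pyRange 0 key_length 1).map (fun j =>
              PySem.List.pyGetD
                (PySem.List.pyGetD chunks (PySem.List.pyGetD perm j 0) []) row ' '))),
         perm))) []

-- ===== PRECONDITION & SPEC =====
def Spec_transposition_cipher_decod (cipher_text : String) (out : List (String × List Int)) : Prop := out = transposition_cipher_decod_alt cipher_text
instance (cipher_text : String) (out : List (String × List Int)) : Decidable (Spec_transposition_cipher_decod cipher_text out) := by unfold Spec_transposition_cipher_decod; infer_instance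

-- ===== CLAIM (what is proved, stated in full; the proofs are below) =====
def Claim_equal_transposition_cipher_decod : Prop := ∀ (cipher_text : String), Dom_transposition_cipher_decod cipher_text → Spec_transposition_cipher_decod cipher_text (transposition_cipher_decod cipher_text)

-- ===== LEMMAS AND PROOFS =====

-- matrix infrastructure: shape invariant and cell access of A's mutable matrix
def pvGood (m : List (List (Option Char))) (r k : Nat) : Prop :=
  m.length = r ∧ ∀ row ∈ m, row.length = k

def pvGet (m : List (List (Option Char))) (l j : Nat) : Option Char :=
  (m.getD l []).getD j none

lemma pv_cons_eraseIdx_perm {α : Type} (xs : List α) (i : Nat) (h : i < xs.length) :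
    (xs[i] :: xs.eraseIdx i).Perm xs := by
  rw [List.eraseIdx_eq_take_drop_succ]
  have h2 : xs = List.take i xs ++ xs[i] :: List.drop (i + 1) xs := by
    conv_lhs => rw [← List.take_append_drop i xs]
    rw [List.getElem_cons_drop]
  conv_rhs => rw [h2]
  exact List.perm_middle.symm

lemma pyPermsAux_perm : ∀ (n : Nat) (xs : List Int), xs.length = n →
    ∀ p ∈ pyPermsAux n xs, p.Perm xs := by
  intro n
  induction n with
  | zero =>
    intro xs hx p hp
    simp only [pyPermsAux, List.mem_singleton] at hp
    subst hp
    cases xs with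
    | nil => exact List.Perm.nil
    | cons a t => simp at hx
  | succ n ih =>
    intro xs hx p hp
    simp only [pyPermsAux, List.mem_flatMap, List.mem_map, List.mem_range] at hp
    obtain ⟨i, hi, q, hq, rfl⟩ := hp
    have hlen : (xs.eraseIdx i).length = n := by
      rw [List.length_eraseIdx]
      simp [hi]
      omega
    have hq' := ih _ hlen q hq
    have hgd : xs.getD i 0 = xs[i] := List.getD_eq_getElem xs 0 hi
    rw [hgd]
    exact (hq'.cons _).trans (pv_cons_eraseIdx_perm xs i hi)

lemma pyPerms_perm (xs : List Int) : ∀ p ∈ pyPerms xs, p.Perm xs :=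
  pyPermsAux_perm xs.length xs rfl

lemma pv_perm_getD_inj (k : Nat) (p : List Int) (hlen : p.length = k) (hnd : p.Nodup)
    {j j' : Nat} (hj : j < k) (hj' : j' < k) (h : p.getD j 0 = p.getD j' 0) : j = j' := by
  rw [List.getD_eq_getElem p 0 (by omega), List.getD_eq_getElem p 0 (by omega)] at h
  exact (List.Nodup.getElem_inj_iff hnd).mp h

-- the dict A builds is the inverse of the permutation
def pvDic (p : List Int) (k : Nat) : PySem.Dict Int Int :=
  (List.range k).foldl (fun d i => d.insert (p.getD i 0) (i : Int)) PySem.Dict.empty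

lemma pvDic_getD (p : List Int) (hnd : p.Nodup) (k : Nat) (hk : k ≤ p.length) :
    ∀ i < k, (pvDic p k).getD (p.getD i 0) 0 = (i : Int) := by
  induction k with
  | zero => intro i hi; omega
  | succ k ih =>
    intro i hi
    have hstep : pvDic p (k + 1) = (pvDic p k).insert (p.getD k 0) (k : Int) := by
      unfold pvDic
      rw [List.range_succ, List.foldl_append]
      rfl
    rw [hstep]
    by_cases hik : i = k
    · subst hik
      exact PySem.Dict.getD_insert_self _ _ _ _
    · have hne : p.getD i 0 ≠ p.getD k 0 := by
        intro h
        exact hik (pv_perm_getD_inj p.length p rfl hnd (by omega) (by omega) h)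
      rw [PySem.Dict.getD_insert_of_ne _ _ _ hne]
      exact ih (by omega) i (by omega)

-- facts about a permutation of range(k)
lemma pv_perm_props (k : Nat) (p : List Int)
    (hp : p.Perm ((List.range k).map (fun i : Nat => (i : Int)))) :
    p.length = k ∧ p.Nodup ∧ (∀ j < k, ∃ c < k, p.getD j 0 = (c : Int)) ∧
      (∀ c < k, ∃ j < k, p.getD j 0 = (c : Int)) := by
  have hlen : p.length = k := by simpa using hp.length_eq
  have hnd : p.Nodup := hp.nodup_iff.mpr
    (List.Nodup.map (fun a b h => by exact_mod_cast h) List.nodup_range)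
  refine ⟨hlen, hnd, ?_, ?_⟩
  · intro j hj
    have hmem : p.getD j 0 ∈ p := by
      rw [List.getD_eq_getElem p 0 (by omega)]
      exact List.getElem_mem _
    obtain ⟨c, hc, hco⟩ := List.mem_map.mp (hp.mem_iff.mp hmem)
    exact ⟨c, List.mem_range.mp hc, hco.symm⟩
  · intro c hc
    have hmem : (c : Int) ∈ p := by
      exact hp.mem_iff.mpr (List.mem_map.mpr ⟨c, List.mem_range.mpr hc, rfl⟩)
    obtain ⟨j, hj, hje⟩ := List.getElem_of_mem hmem
    refine ⟨j, by omega, ?_⟩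
    rw [List.getD_eq_getElem p 0 hj, hje]


-- one matrix write
lemma pvGet_set (m : List (List (Option Char))) (r k l j : Nat)
    (hm : pvGood m r k) (hl : l < r) (hj : j < k) (v : Option Char) :
    pvGood (m.set l ((m.getD l []).set j v)) r k ∧
      ∀ l' j', pvGet (m.set l ((m.getD l []).set j v)) l' j' =
        if l' = l ∧ j' = j then v else pvGet m l' j' := by
  obtain ⟨hlen, hrows⟩ := hm
  have hrowlen : (m.getD l []).length = k := by
    rw [List.getD_eq_getElem m [] (by omega)]
    exact hrows _ (List.getElem_mem _)
  constructor
  · refine ⟨by simpa using hlen, ?_⟩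
    intro row hrow
    rcases List.mem_or_eq_of_mem_set hrow with h | h
    · exact hrows _ h
    · rw [h]; simpa using hrowlen
  · intro l' j'
    unfold pvGet
    have hml : l < m.length := by omega
    have hrowl : m[l].length = k := hrows _ (List.getElem_mem hml)
    by_cases hll : l = l'
    · subst hll
      by_cases hjj : j = j'
      · subst hjj
        simp [List.getD_eq_getElem?_getD, hml, hrowl, hj]
      · simp [List.getD_eq_getElem?_getD, hml, hjj, Ne.symm hjj]
    · simp [List.getD_eq_getElem?_getD, hll, Ne.symm hll]

-- inner loop: one column fill (column index j, ciphertext offset a)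
lemma pv_fill_col (cs : List Char) (r k j a : Nat) (m : List (List (Option Char)))
    (hm : pvGood m r k) (hj : j < k) :
    ∃ m', ((List.range r).foldl
        (fun (t : List (List (Option Char)) × Int) (l : Nat) =>
          (PySem.List.pySetD t.1 (l : Int)
             (PySem.List.pySetD (PySem.List.pyGetD t.1 (l : Int) []) (j : Int)
                (some (PySem.List.pyGetD cs t.2 ' '))),
           t.2 + 1)) (m, (a : Int)))
      = (m', ((a + r : Nat) : Int)) ∧ pvGood m' r k ∧
      ∀ l' j', pvGet m' l' j' =
        if j' = j ∧ l' < r then some (cs.getD (a + l') ' ') else pvGet m l' j' := by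
  suffices h : ∀ t ≤ r, ∃ m', ((List.range t).foldl
        (fun (t : List (List (Option Char)) × Int) (l : Nat) =>
          (PySem.List.pySetD t.1 (l : Int)
             (PySem.List.pySetD (PySem.List.pyGetD t.1 (l : Int) []) (j : Int)
                (some (PySem.List.pyGetD cs t.2 ' '))),
           t.2 + 1)) (m, (a : Int)))
      = (m', ((a + t : Nat) : Int)) ∧ pvGood m' r k ∧
      ∀ l' j', pvGet m' l' j' =
        if j' = j ∧ l' < t then some (cs.getD (a + l') ' ') else pvGet m l' j' by
    exact h r le_rfl
  intro t
  induction t with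
  | zero =>
    intro _
    exact ⟨m, by simp, hm, fun l' j' => by simp⟩
  | succ t ih =>
    intro ht
    obtain ⟨m₁, heq, hg₁, hget₁⟩ := ih (by omega)
    refine ⟨m₁.set t ((m₁.getD t []).set j (some (cs.getD (a + t) ' '))), ?_, ?_, ?_⟩
    · rw [List.range_succ, List.foldl_append, heq]
      simp only [List.foldl_cons, List.foldl_nil, PySem.List.pySetD_natCast,
        PySem.List.pyGetD_natCast]
      congr 1
    · exact (pvGet_set m₁ r k t j hg₁ (by omega) hj _).1
    · intro l' j'
      rw [(pvGet_set m₁ r k t j hg₁ (by omega) hj _).2 l' j', hget₁ l' j']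
      by_cases h1 : l' = t ∧ j' = j
      · obtain ⟨rfl, rfl⟩ := h1
        simp
      · rw [if_neg h1]
        by_cases h2 : j' = j ∧ l' < t
        · rw [if_pos h2, if_pos ⟨h2.1, by omega⟩]
        · rw [if_neg h2, if_neg ?_]
          rintro ⟨hje, hlt⟩
          subst hje
          simp only [and_true, true_and] at h1 h2
          omega

-- outer loop: all columns filled; dic sends coluna c to column j with p[j] = c
lemma pv_fill_all (cs : List Char) (r k : Nat) (p : List Int) (dic : PySem.Dict Int Int)
    (hdic : ∀ c < k, ∃ j < k, dic.getD (c : Int) 0 = (j : Int) ∧ p.getD j 0 = (c : Int))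
    (hinj : ∀ j < k, ∀ c < k, p.getD j 0 = (c : Int) → dic.getD (c : Int) 0 = (j : Int))
    (hpr : ∀ j < k, ∃ c < k, p.getD j 0 = (c : Int))
    (m : List (List (Option Char))) (hm : pvGood m r k) :
    ∃ m', ((List.range k).foldl
        (fun (t : List (List (Option Char)) × Int) (c : Nat) =>
          (List.range r).foldl
            (fun (t : List (List (Option Char)) × Int) (l : Nat) =>
              (PySem.List.pySetD t.1 (l : Int)
                 (PySem.List.pySetD (PySem.List.pyGetD t.1 (l : Int) [])
                    (dic.getD (c : Int) 0)
                    (some (PySem.List.pyGetD cs t.2 ' '))),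
               t.2 + 1)) t) (m, (0 : Int)))
      = (m', ((k * r : Nat) : Int)) ∧ pvGood m' r k ∧
      ∀ l < r, ∀ j < k, pvGet m' l j = some (cs.getD ((p.getD j 0).toNat * r + l) ' ') := by
  suffices h : ∀ t ≤ k, ∃ m', ((List.range t).foldl
        (fun (t : List (List (Option Char)) × Int) (c : Nat) =>
          (List.range r).foldl
            (fun (t : List (List (Option Char)) × Int) (l : Nat) =>
              (PySem.List.pySetD t.1 (l : Int)
                 (PySem.List.pySetD (PySem.List.pyGetD t.1 (l : Int) [])
                    (dic.getD (c : Int) 0)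
                    (some (PySem.List.pyGetD cs t.2 ' '))),
               t.2 + 1)) t) (m, (0 : Int)))
      = (m', ((t * r : Nat) : Int)) ∧ pvGood m' r k ∧
      ∀ l < r, ∀ j < k, pvGet m' l j =
        if p.getD j 0 < (t : Int) then some (cs.getD ((p.getD j 0).toNat * r + l) ' ')
        else pvGet m l j by
    obtain ⟨m', heq, hg, hget⟩ := h k le_rfl
    refine ⟨m', heq, hg, fun l hl j hj => ?_⟩
    obtain ⟨c, hc, hpc⟩ := hpr j hj
    rw [hget l hl j hj, if_pos (by rw [hpc]; exact_mod_cast hc)]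
  intro t
  induction t with
  | zero =>
    intro _
    refine ⟨m, by simp, hm, fun l hl j hj => ?_⟩
    rw [if_neg ?_]
    obtain ⟨c, _, hpc⟩ := hpr j hj
    rw [hpc]
    exact_mod_cast Nat.not_lt_zero c
  | succ t ih =>
    intro ht
    obtain ⟨m₁, heq, hg₁, hget₁⟩ := ih (by omega)
    obtain ⟨jc, hjc, hdt, hpt⟩ := hdic t (by omega)
    obtain ⟨m₂, heq₂, hg₂, hget₂⟩ := pv_fill_col cs r k jc (t * r) m₁ hg₁ hjc
    refine ⟨m₂, ?_, hg₂, ?_⟩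
    · rw [List.range_succ, List.foldl_append, heq]
      simp only [List.foldl_cons, List.foldl_nil]
      rw [hdt, heq₂]
      congr 1
      push_cast
      ring
    · intro l hl j hj
      rw [hget₂ l j, hget₁ l hl j hj]
      obtain ⟨c, hc, hpc⟩ := hpr j hj
      by_cases hjjc : j = jc
      · subst hjjc
        rw [if_pos ⟨rfl, hl⟩, if_pos (by rw [hpt]; exact_mod_cast Nat.lt_succ_self t)]
        rw [hpt]
        simp
      · have hct : c ≠ t := by
          intro hcteq
          subst hcteq
          exact hjjc (by
            have := hinj j hj c hc hpc
            rw [this] at hdt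
            exact_mod_cast hdt)
        rw [if_neg (by simp [hjjc])]
        rw [hpc]
        by_cases hlt : c < t
        · rw [if_pos (by exact_mod_cast hlt), if_pos (by exact_mod_cast Nat.lt_succ_of_lt hlt)]
        · rw [if_neg (by exact_mod_cast hlt), if_neg (by exact_mod_cast (by omega : ¬ c < t + 1))]

-- the string B builds for a permutation p (also what A's matrix concatenates to)
def pvStr (cs : List Char) (r k : Nat) (p : List Int) : String :=
  String.ofList ((List.range r).flatMap (fun l =>
    (List.range k).map (fun j => cs.getD ((p.getD j 0).toNat * r + l) ' ')))

lemma pv_push_fold (chars : List Char) : ∀ s : String,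
    (chars.map some).foldl pvStep s = s ++ String.ofList chars := by
  induction chars with
  | nil => intro s; apply String.ext; simp
  | cons c cs ih =>
    intro s
    simp only [List.map_cons, List.foldl_cons]
    rw [show pvStep s (some c) = s.push c from rfl, ih]
    apply String.ext
    simp

lemma pv_append_fold (ws : List (List Char)) : ∀ s,
    ws.foldl (fun s w => s ++ String.ofList w) s = s ++ String.ofList ws.flatten := by
  induction ws with
  | nil => intro s; apply String.ext; simp
  | cons w ws ih =>
    intro s
    simp only [List.foldl_cons]
    rw [ih]
    apply String.ext
    simp

lemma pv_concat (m : List (List (Option Char))) (r k : Nat) (hm : pvGood m r k)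
    (v : Nat → Nat → Char) (hv : ∀ l < r, ∀ j < k, pvGet m l j = some (v l j)) :
    m.foldl (fun s row => row.foldl pvStep s) "" =
      String.ofList ((List.range r).flatMap (fun l => (List.range k).map (fun j => v l j))) := by
  have hm_eq : m = (List.range r).map (fun l => (List.range k).map (fun j => some (v l j))) := by
    apply List.ext_getElem
    · simp [hm.1]
    · intro l h1 h2
      have hl : l < r := by simpa [hm.1] using h1
      have hrl : m[l].length = k := hm.2 _ (List.getElem_mem h1)
      apply List.ext_getElem
      · simp [hrl]
      · intro j hj1 hj2
        have hjk : j < k := by simpa [hrl] using hj1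
        have hcell := hv l hl j hjk
        unfold pvGet at hcell
        rw [List.getD_eq_getElem m [] (by omega), List.getD_eq_getElem _ none (by omega)] at hcell
        simpa using hcell
  rw [hm_eq, List.foldl_map]
  have hrow : ∀ (s : String) (l : Nat),
      ((List.range k).map (fun j => some (v l j))).foldl pvStep s =
        s ++ String.ofList ((List.range k).map (v l)) := by
    intro s l
    rw [show (List.range k).map (fun j => some (v l j))
          = ((List.range k).map (v l)).map some by rw [List.map_map]; rfl]
    exact pv_push_fold _ s
  rw [PySem.List.foldl_congr_mem _ _
        (fun s l => s ++ String.ofList ((List.range k).map (v l))) _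
        (fun s l _ => hrow s l)]
  rw [← List.foldl_map (f := fun l => (List.range k).map (v l))
        (g := fun (s : String) w => s ++ String.ofList w)]
  rw [pv_append_fold]
  apply String.ext
  simp [List.flatMap_def]

-- one perm step of A: the filled matrix is good and concatenates to pvStr
lemma pv_perm_step (cs : List Char) (k r : Nat) (_hn : cs.length = k * r)
    (p : List Int) (hp : p.Perm ((List.range k).map (fun i : Nat => (i : Int))))
    (m : List (List (Option Char))) (hm : pvGood m r k) :
    pvGood ((PySem.List.pyRange 0 (k : Int) 1).foldl
        (fun (t : List (List (Option Char)) × Int) coluna =>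
          (PySem.List.pyRange 0 ((r : Nat) : Int) 1).foldl
            (fun (t : List (List (Option Char)) × Int) linha =>
              (PySem.List.pySetD t.1 linha
                 (PySem.List.pySetD (PySem.List.pyGetD t.1 linha [])
                    (PySem.Dict.getD
                      ((PySem.List.pyRange 0 (k : Int) 1).foldl
                        (fun d i => d.insert (PySem.List.pyGetD p i 0) i) PySem.Dict.empty)
                      coluna 0)
                    (some (PySem.List.pyGetD cs t.2 ' '))),
               t.2 + 1)) t)
        (m, (0 : Int))).1 r k ∧
    ((PySem.List.pyRange 0 (k : Int) 1).foldl
        (fun (t : List (List (Option Char)) × Int) coluna =>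
          (PySem.List.pyRange 0 ((r : Nat) : Int) 1).foldl
            (fun (t : List (List (Option Char)) × Int) linha =>
              (PySem.List.pySetD t.1 linha
                 (PySem.List.pySetD (PySem.List.pyGetD t.1 linha [])
                    (PySem.Dict.getD
                      ((PySem.List.pyRange 0 (k : Int) 1).foldl
                        (fun d i => d.insert (PySem.List.pyGetD p i 0) i) PySem.Dict.empty)
                      coluna 0)
                    (some (PySem.List.pyGetD cs t.2 ' '))),
               t.2 + 1)) t)
        (m, (0 : Int))).1.foldl (fun s row => row.foldl pvStep s) "" = pvStr cs r k p := by
  obtain ⟨hlen, hnd, hpr, hsurj⟩ := pv_perm_props k p hp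
  have hdic_eq : List.foldl
      (fun (d : PySem.Dict Int Int) (i : Nat) => d.insert (PySem.List.pyGetD p (i : Int) 0) (i : Int))
      PySem.Dict.empty (List.range k) = pvDic p k := by
    unfold pvDic
    apply PySem.List.foldl_congr_mem
    intro d i _
    rw [PySem.List.pyGetD_natCast]
  have hdic : ∀ c < k, ∃ j < k, (pvDic p k).getD (c : Int) 0 = (j : Int) ∧
      p.getD j 0 = (c : Int) := by
    intro c hc
    obtain ⟨j, hj, hpj⟩ := hsurj c hc
    refine ⟨j, hj, ?_, hpj⟩
    have := pvDic_getD p hnd k (by omega) j hj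
    rwa [hpj] at this
  have hinj : ∀ j < k, ∀ c < k, p.getD j 0 = (c : Int) →
      (pvDic p k).getD (c : Int) 0 = (j : Int) := by
    intro j hj c _ hpj
    have := pvDic_getD p hnd k (by omega) j hj
    rwa [hpj] at this
  simp only [PySem.List.pyRange_zero_nat, List.foldl_map]
  simp only [hdic_eq]
  obtain ⟨m', heq, hg, hget⟩ := pv_fill_all cs r k p (pvDic p k) hdic hinj hpr m hm
  rw [heq]
  refine ⟨hg, ?_⟩
  rw [pv_concat m' r k hg (fun l j => cs.getD ((p.getD j 0).toNat * r + l) ' ')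
        (fun l hl j hj => hget l hl j hj)]
  rfl

-- the fold over all perms appends pvStr entries
lemma pv_perms_fold (cs : List Char) (k r : Nat) (hn : cs.length = k * r) :
    ∀ ps : List (List Int),
      (∀ p ∈ ps, p.Perm ((List.range k).map (fun i : Nat => (i : Int)))) →
      ∀ (m : List (List (Option Char))) (acc : List (String × List Int)), pvGood m r k →
    (ps.foldl
      (fun (st : List (List (Option Char)) × List (String × List Int)) perm =>
        let dic : PySem.Dict Int Int :=
          (PySem.List.pyRange 0 (k : Int) 1).foldl
            (fun d i => d.insert (PySem.List.pyGetD perm i 0) i) PySem.Dict.empty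
        let fill := (PySem.List.pyRange 0 (k : Int) 1).foldl
          (fun (t : List (List (Option Char)) × Int) coluna =>
            (PySem.List.pyRange 0 ((r : Nat) : Int) 1).foldl
              (fun (t : List (List (Option Char)) × Int) linha =>
                (PySem.List.pySetD t.1 linha
                   (PySem.List.pySetD (PySem.List.pyGetD t.1 linha [])
                      (PySem.Dict.getD dic coluna 0)
                      (some (PySem.List.pyGetD cs t.2 ' '))),
                 t.2 + 1)) t)
          (st.1, (0 : Int))
        (fill.1, st.2 ++ [(fill.1.foldl (fun s row => row.foldl pvStep s) "", perm)]))
      (m, acc)).2 = acc ++ ps.map (fun p => (pvStr cs r k p, p)) := by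
  intro ps
  induction ps with
  | nil => intro _ m acc _; simp
  | cons p ps ih =>
    intro hps m acc hm
    rw [List.foldl_cons]
    obtain ⟨hg', hstr⟩ := pv_perm_step cs k r hn p (hps p List.mem_cons_self) m hm
    dsimp only
    rw [hstr]
    rw [ih (fun q hq => hps q (List.mem_cons_of_mem _ hq)) _ _ hg']
    simp

-- B's join equals pvStr for a permutation of range(k)
lemma pv_b_str (cs : List Char) (k r : Nat) (_hn : cs.length = k * r)
    (p : List Int) (hp : p.Perm ((List.range k).map (fun i : Nat => (i : Int)))) :
    String.ofList ((PySem.List.pyRange 0 ((r : Nat) : Int) 1).flatMap (fun row =>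
      (PySem.List.pyRange 0 (k : Int) 1).map (fun j =>
        PySem.List.pyGetD
          (PySem.List.pyGetD
            ((PySem.List.pyRange 0 (k : Int) 1).map (fun c =>
              PySem.List.slice cs (some (c * ((r : Nat) : Int)))
                (some ((c + 1) * ((r : Nat) : Int)))))
            (PySem.List.pyGetD p j 0) []) row ' ')))
    = pvStr cs r k p := by
  obtain ⟨hlen, hnd, hpr, hsurj⟩ := pv_perm_props k p hp
  unfold pvStr
  congr 1
  simp only [PySem.List.pyRange_zero_nat, List.flatMap_map, List.map_map]
  apply List.flatMap_congr
  intro row hrowmem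
  have hrow : row < r := List.mem_range.mp hrowmem
  apply List.map_congr_left
  intro j hjmem
  have hj : j < k := List.mem_range.mp hjmem
  simp only [Function.comp_apply, PySem.List.pyGetD_natCast]
  obtain ⟨c, hc, hpc⟩ := hpr j hj
  rw [hpc, PySem.List.pyGetD_natCast]
  simp only [List.getD_eq_getElem?_getD, List.getElem?_map, List.getElem?_range hc,
    Function.comp_apply, Option.map_some, Option.getD_some]
  have h1 : ((c : Int) * ((r : Nat) : Int)) = ((c * r : Nat) : Int) := by push_cast; ring
  have h2 : (((c : Int) + 1) * ((r : Nat) : Int)) = (((c + 1) * r : Nat) : Int) := by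
    push_cast; ring
  rw [h1, h2, PySem.List.slice_natCast]
  have h3 : (c + 1) * r - c * r = r := by ring_nf; omega
  rw [h3]
  simp [hrow, List.getElem?_drop]

-- ===== VERDICT (by name: the statement is the Claim_ definition above) =====
theorem transposition_cipher_decod_spec : Claim_equal_transposition_cipher_decod := by
  unfold Claim_equal_transposition_cipher_decod Spec_transposition_cipher_decod
  intro s _
  unfold transposition_cipher_decod transposition_cipher_decod_alt
  dsimp only
  rw [show ((26 : Int) + 1) = 27 by norm_num]
  apply PySem.List.foldl_congr_mem
  intro acc kl hkl
  obtain ⟨h1, h2⟩ := PySem.List.mem_pyRange_one.mp hkl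
  obtain ⟨k, rfl⟩ : ∃ k : Nat, kl = (k : Int) := ⟨kl.toNat, (Int.toNat_of_nonneg (by omega)).symm⟩
  by_cases hc : PySem.Int.mod (s.toList.length : Int) (k : Int) ≠ 0
  · rw [if_pos hc, if_pos hc]
  · rw [if_neg hc, if_neg hc]
    have hk1 : 1 ≤ k := by exact_mod_cast h1
    have hmod : s.toList.length % k = 0 := by
      rw [PySem.Int.mod_natCast] at hc
      exact_mod_cast not_not.mp hc
    have hn : s.toList.length = k * (s.toList.length / k) :=
      (Nat.mul_div_cancel' (Nat.dvd_of_mod_eq_zero hmod)).symm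
    simp only [PySem.Int.floordiv_natCast]
    have hperm : ∀ p ∈ pyPerms (PySem.List.pyRange 0 (k : Int) 1),
        p.Perm ((List.range k).map (fun i : Nat => (i : Int))) := by
      intro p hp
      have := pyPerms_perm _ p hp
      rwa [PySem.List.pyRange_zero_nat] at this
    have hgood : pvGood ((PySem.List.pyRange 0 ((s.toList.length / k : Nat) : Int) 1).map
        (fun _ => (PySem.List.pyRange 0 (k : Int) 1).map (fun _ => (none : Option Char))))
        (s.toList.length / k) k := by
      constructor
      · rw [List.length_map, PySem.List.pyRange_zero_nat, List.length_map, List.length_range]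
      · intro row hrow
        obtain ⟨_, _, rfl⟩ := List.mem_map.mp hrow
        rw [List.length_map, PySem.List.pyRange_zero_nat, List.length_map, List.length_range]
    have hA := pv_perms_fold s.toList k (s.toList.length / k) hn
      (pyPerms (PySem.List.pyRange 0 (k : Int) 1)) hperm
      ((PySem.List.pyRange 0 ((s.toList.length / k : Nat) : Int) 1).map
        (fun _ => (PySem.List.pyRange 0 (k : Int) 1).map (fun _ => (none : Option Char))))
      acc hgood
    refine hA.trans (congrArg (fun t => acc ++ t) (List.map_congr_left (fun p hp => ?_)))
    rw [pv_b_str s.toList k (s.toList.length / k) hn p (hperm p hp)]
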